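-- pv_equiv track=rewrite | github.com/mk-a/hateful_tweet_recognition | words_repeated_char.py | create_word
-- ===== SOURCE A (Python) =====
-- def create_word(parsed, string = ''):
--     """ Returns the list all the different combinations of words from a token previously parsed by `test_repetition`
--         by reducing the number of consecutive repetition of a character to one or two.
--         For example, for the token "tomorrrroooooow", `test_repetition` parses it into :
--             [('tomo', False), ('r', True), ('o', True), ('w', False)]
--         and then, this function returns these combinations :
--             ['tomorow', 'tomoroow', 'tomorrow', 'tomorroow']
--     """
--     if not parsed:
--         return [string]
--     else :
--         tmp, is_repeted = parsed.pop(0)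
--         if is_repeted:
--             return create_word(parsed.copy(), string + tmp) + create_word(parsed.copy(), string + 2 * tmp)
--         else :
--             return create_word(parsed.copy(), string + tmp)
-- ===== SOURCE B (Python) =====
-- def create_word(parsed, string=''):
--     combos = [string]
--     for tmp, is_repeated in parsed:
--         options = [tmp, tmp + tmp] if is_repeated else [tmp]
--         combos = [c + o for c in combos for o in options]
--     return combos
-- ===== Notes on version B (the rewrite author's own statement) =====
-- stated objective: simpler
-- what changed: Replaces A's branching recursion (which copies and mutates the list at every call) with a single iterative loop that extends all partial combinations segment by segment; B does not mutate the caller's list, so equivalence is about the return value only.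
import Mathlib
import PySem

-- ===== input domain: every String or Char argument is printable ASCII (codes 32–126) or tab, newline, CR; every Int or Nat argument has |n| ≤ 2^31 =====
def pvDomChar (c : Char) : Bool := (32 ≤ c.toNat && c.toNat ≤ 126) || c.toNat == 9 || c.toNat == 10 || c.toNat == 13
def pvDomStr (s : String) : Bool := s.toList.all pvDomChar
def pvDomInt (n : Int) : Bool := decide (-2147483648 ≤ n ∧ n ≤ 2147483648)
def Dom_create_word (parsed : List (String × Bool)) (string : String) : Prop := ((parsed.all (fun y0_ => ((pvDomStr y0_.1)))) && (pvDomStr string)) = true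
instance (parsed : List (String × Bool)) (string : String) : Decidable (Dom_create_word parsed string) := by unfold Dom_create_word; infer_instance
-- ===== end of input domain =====

-- B replaces A's branching recursion with one iterative pass extending all partial
-- combinations; return-value equivalence only — A pops the first element of the
-- caller's list (a side effect), B does not mutate its argument.

-- ===== PORT A =====
def create_word (parsed : List (String × Bool)) (string : String) : List String :=
  match parsed with
  | [] => [string]
  | (tmp, is_repeted) :: rest =>
    if is_repeted then
      create_word rest (string ++ tmp) ++ create_word rest (string ++ (tmp ++ tmp))
    else
      create_word rest (string ++ tmp)

-- ===== PORT B =====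
def create_word_alt (parsed : List (String × Bool)) (string : String) : List String :=
  parsed.foldl (fun combos p =>
    let options := if p.2 then [p.1, p.1 ++ p.1] else [p.1]
    combos.flatMap (fun c => options.map (fun o => c ++ o))) [string]

-- ===== PRECONDITION & SPEC =====
def Spec_create_word (parsed : List (String × Bool)) (string : String) (out : List String) : Prop := out = create_word_alt parsed string
instance (parsed : List (String × Bool)) (string : String) (out : List String) : Decidable (Spec_create_word parsed string out) := by unfold Spec_create_word; infer_instance

-- ===== CLAIM (what is proved, stated in full; the proofs are below) =====
def Claim_equal_create_word : Prop := ∀ (parsed : List (String × Bool)) (string : String), Dom_create_word parsed string → Spec_create_word parsed string (create_word parsed string)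

-- ===== LEMMAS AND PROOFS =====
theorem foldl_eq_flatMap_create_word (parsed : List (String × Bool)) (acc : List String) :
    parsed.foldl (fun combos p =>
      let options := if p.2 then [p.1, p.1 ++ p.1] else [p.1]
      combos.flatMap (fun c => options.map (fun o => c ++ o))) acc
      = acc.flatMap (fun c => create_word parsed c) := by
  induction parsed generalizing acc with
  | nil => simp [create_word]
  | cons hd rest ih =>
    obtain ⟨tmp, rep⟩ := hd
    rw [List.foldl_cons, ih]
    cases rep <;> (
      simp only [create_word, List.flatMap_def]
      induction acc with
      | nil => simp
      | cons a t iht => simp_all)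

-- ===== VERDICT (by name: the statement is the Claim_ definition above) =====
theorem create_word_spec : Claim_equal_create_word := by
  intro parsed string _
  unfold Spec_create_word create_word_alt
  rw [foldl_eq_flatMap_create_word]
  simp
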